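-- pv_equiv track=rewrite | github.com/open-resources/problem_bank_scripts | src/problem_bank_scripts/problem_bank_scripts.py | dict_to_md
-- ===== SOURCE A (Python) =====
-- from collections import defaultdict
--
-- def defdict_to_dict(defdict, finaldict):
--     """Convert a defaultdict (nested) to a regular dictionary.
--         - Answer copied from: https://stackoverflow.com/a/61133504/2217577
--     Args:
--         defdict (dict): defaultdict
--         finaldict (dict): regular dictionary
--
--     Returns:
--         dict: Convert to regular dictionary
--     """
--     # pass in an empty dict for finaldict
--     for k, v in defdict.items():
--         if isinstance(v, defaultdict):
--             # new level created and that is the new value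
--             finaldict[k] = defdict_to_dict(v, {})
--         else:
--             finaldict[k] = v
--     return finaldict
--
-- def dict_to_md(
--     md_dict,
--     remove_keys=[
--         None,
--     ],
-- ):
--     """Takes a nested dictionary (e.g. output of read_md_problem()) and returns a multi-line string  that can be written to a file (after removing specified keys).
--     Args:
--         md_dict (dict): A nested dictionary, for e.g. the output of `read_md_problem()`
--         remove_keys (list, optional): Any keys to remove from the dictionary, for instance solutions. Defaults to [None,].
--
--     Returns:
--         str: A multi-line string that can be written to a file.
--     """
--
--     md_string = ""
--
--     md_dict = defdict_to_dict(md_dict, {})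
--
--     # Question Title and Preamble
--     md_string += md_dict.pop("title", None)
--     md_string += md_dict.pop("preamble", None)
--
--     # TODO: Refactor this to use the elegant solution provided here: https://stackoverflow.com/a/49723101/2217577
--
--     for k, v in md_dict.items():
--         if k in remove_keys:
--             continue
--         else:
--             md_string += "\n" + md_dict[k]
--
--     return md_string
-- ===== SOURCE B (Python) =====
-- def dict_to_md(
--     md_dict,
--     remove_keys=[
--         None,
--     ],
-- ):
--     body = "".join(
--         "\n" + v
--         for k, v in md_dict.items()
--         if k not in ("title", "preamble") and k not in remove_keys
--     )
--     return md_dict["title"] + md_dict["preamble"] + body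
-- ===== Notes on version B (the rewrite author's own statement) =====
-- stated objective: simpler
-- what changed: B drops A's recursive defaultdict-to-dict rebuild, destructive pops and string-accumulator loop, computing the result as two direct lookups plus a join over one filtered comprehension.
import Mathlib
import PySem

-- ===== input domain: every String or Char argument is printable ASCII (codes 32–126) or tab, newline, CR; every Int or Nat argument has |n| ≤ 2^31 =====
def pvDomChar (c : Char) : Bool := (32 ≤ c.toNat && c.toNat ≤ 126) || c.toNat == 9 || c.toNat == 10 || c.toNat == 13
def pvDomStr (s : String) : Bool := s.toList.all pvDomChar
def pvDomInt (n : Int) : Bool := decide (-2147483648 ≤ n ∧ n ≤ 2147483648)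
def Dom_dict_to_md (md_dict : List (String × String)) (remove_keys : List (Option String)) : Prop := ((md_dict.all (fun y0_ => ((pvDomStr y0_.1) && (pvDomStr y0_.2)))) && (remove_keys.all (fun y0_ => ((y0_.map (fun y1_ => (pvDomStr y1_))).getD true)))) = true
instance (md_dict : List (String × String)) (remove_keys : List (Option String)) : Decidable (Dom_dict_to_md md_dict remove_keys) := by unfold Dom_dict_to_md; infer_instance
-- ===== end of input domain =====

-- B replaces A's dict-rebuild / destructive-pop / accumulator loop by two direct lookups plus a
-- join over one filtered comprehension (objective: simpler). Return-value equivalence only; neither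
-- version mutates its arguments (A pops from its own rebuilt copy).

-- ===== PORT A =====
-- defdict_to_dict(defdict, {}): the flat input has no nested defaultdicts, so every iteration
-- takes the else-branch finaldict[k] = v; the loop is a fold of dict inserts.
def defdict_to_dict (defdict : List (String × String)) (finaldict : PySem.Dict String String) : PySem.Dict String String :=
  defdict.foldl (fun fd kv => fd.insert kv.1 kv.2) finaldict

def dict_to_md (md_dict : List (String × String)) (remove_keys : List (Option String)) : String :=
  let md_string := ""
  let d := defdict_to_dict md_dict (PySem.Dict.mk [])
  -- md_dict.pop("title", None): a missing key yields None and str + None raises TypeError; such inputs are outside Pre_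
  let md_string := md_string ++ d.getD "title" ""
  let d := d.erase "title"
  let md_string := md_string ++ d.getD "preamble" ""
  let d := d.erase "preamble"
  d.items.foldl (fun s kv => if remove_keys.contains (some kv.1) then s else s ++ ("\n" ++ d.getD kv.1 "")) md_string

-- ===== PORT B =====
-- md_dict[k]; a missing key raises KeyError in Python — such inputs are outside Pre_
def pyDictGetItem (md : List (String × String)) (k : String) : String :=
  ((md.find? (fun kv => kv.1 == k)).map (fun kv => kv.2)).getD ""

def dict_to_md_alt (md_dict : List (String × String)) (remove_keys : List (Option String)) : String :=
  let body := PySem.Str.join ""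
    ((md_dict.filter (fun kv => !(kv.1 == "title") && !(kv.1 == "preamble") && !(remove_keys.contains (some kv.1)))).map
      (fun kv => "\n" ++ kv.2))
  pyDictGetItem md_dict "title" ++ pyDictGetItem md_dict "preamble" ++ body

-- ===== PRECONDITION & SPEC =====
-- Pre_ excludes md_dict lacking a "title" or "preamble" key (A raises TypeError on str + None there)
-- and md_dict with duplicate keys, which no Python dict can hold, so the association-list reading
-- of such an input is unspecified (both Pythons see the collapsed dict and agree there).
def Pre_dict_to_md (md_dict : List (String × String)) (_remove_keys : List (Option String)) : Prop :=
  "title" ∈ md_dict.map Prod.fst ∧ "preamble" ∈ md_dict.map Prod.fst ∧ (md_dict.map Prod.fst).Nodup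

instance (md_dict : List (String × String)) (remove_keys : List (Option String)) : Decidable (Pre_dict_to_md md_dict remove_keys) := by unfold Pre_dict_to_md; infer_instance

def pvWitness_dict_to_md : (List (String × String)) × List (Option String) :=
  ([("title", "T1\n"), ("preamble", "P\n"), ("a", "x"), ("b", "y")], [some "a", none])

def Spec_dict_to_md (md_dict : List (String × String)) (remove_keys : List (Option String)) (out : String) : Prop := out = dict_to_md_alt md_dict remove_keys
instance (md_dict : List (String × String)) (remove_keys : List (Option String)) (out : String) : Decidable (Spec_dict_to_md md_dict remove_keys out) := by unfold Spec_dict_to_md; infer_instance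

-- ===== CLAIM (what is proved, stated in full; the proofs are below) =====
def Claim_equal_dict_to_md : Prop := ∀ (md_dict : List (String × String)) (remove_keys : List (Option String)), Dom_dict_to_md md_dict remove_keys → Pre_dict_to_md md_dict remove_keys → Spec_dict_to_md md_dict remove_keys (dict_to_md md_dict remove_keys)

-- ===== LEMMAS AND PROOFS =====

theorem joinEmpty_cons (a : String) (l : List String) :
    PySem.Str.join "" (a :: l) = a ++ PySem.Str.join "" l := by
  have h : (PySem.Str.join "" (a :: l)).toList = (a ++ PySem.Str.join "" l).toList := by
    simp [PySem.Str.toList_join, PySem.Chars.join, List.intercalate]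
    cases l <;> simp
  exact String.toList_inj.mp h

theorem joinEmpty_nil : PySem.Str.join "" ([] : List String) = "" := by decide

-- the defdict_to_dict fold of inserts over nodup fresh keys just rebuilds the list
theorem defdict_to_dict_items (md : List (String × String))
    (h : (md.map Prod.fst).Nodup) :
    (defdict_to_dict md (PySem.Dict.mk [])).items = md := by
  unfold defdict_to_dict
  have := PySem.Dict.items_foldl_insert_fresh (l := md) (k := Prod.fst) (v := Prod.snd)
    (d := PySem.Dict.mk []) (by intro a _; rfl) h
  simpa using this

theorem find?_filter_ne (key1 key2 : String) (hne : key2 ≠ key1) (l : List (String × String)) :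
    (l.filter (fun p => !(p.1 == key1))).find? (fun p => p.1 == key2)
      = l.find? (fun p => p.1 == key2) := by
  induction l with
  | nil => rfl
  | cons x t ih =>
    by_cases hx : x.1 = key1
    · rw [List.filter_cons_of_neg (by simp [hx]), ih,
        List.find?_cons_of_neg (by simp [hx, Ne.symm hne])]
    · rw [List.filter_cons_of_pos (by simp [hx])]
      by_cases hx2 : x.1 = key2
      · rw [List.find?_cons_of_pos (by simp [hx2]), List.find?_cons_of_pos (by simp [hx2])]
      · rw [List.find?_cons_of_neg (by simp [hx2]), List.find?_cons_of_neg (by simp [hx2]), ih]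

theorem loop_eq (rk : List (Option String)) (g : String × String → String) :
    ∀ (items : List (String × String)) (acc : String), (∀ kv ∈ items, g kv = kv.2) →
      items.foldl (fun s kv => if rk.contains (some kv.1) then s else s ++ ("\n" ++ g kv)) acc
        = acc ++ PySem.Str.join "" ((items.filter (fun kv => !(rk.contains (some kv.1)))).map (fun kv => "\n" ++ kv.2)) := by
  intro items
  induction items with
  | nil => intro acc _; simp [joinEmpty_nil]
  | cons x t ih =>
    intro acc hg
    by_cases hx : rk.contains (some x.1)
    · simp only [List.foldl_cons, List.filter_cons, hx]
      simpa using ih acc (fun kv hm => hg kv (List.mem_cons_of_mem _ hm))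
    · have hgx := hg x (List.mem_cons_self)
      simp only [List.foldl_cons, List.filter_cons, hx]
      rw [if_neg (by simp [hx]), ih _ (fun kv hm => hg kv (List.mem_cons_of_mem _ hm))]
      simp [joinEmpty_cons, hgx, String.append_assoc]

-- ===== VERDICT (by name: the statement is the Claim_ definition above) =====
theorem dict_to_md_spec : Claim_equal_dict_to_md := by
  intro md rk _ hpre
  obtain ⟨ht, hp, hnd⟩ := hpre
  unfold Spec_dict_to_md dict_to_md dict_to_md_alt
  rw [show defdict_to_dict md (PySem.Dict.mk []) = PySem.Dict.mk md from
    PySem.Dict.ext (defdict_to_dict_items md hnd)]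
  show (List.filter (fun p => !(p.1 == "preamble")) (List.filter (fun p => !(p.1 == "title")) md)).foldl
      (fun s kv => if rk.contains (some kv.1) then s
        else s ++ ("\n" ++ (PySem.Dict.mk (List.filter (fun p => !(p.1 == "preamble"))
          (List.filter (fun p => !(p.1 == "title")) md))).getD kv.1 ""))
      (("" ++ (PySem.Dict.mk md).getD "title" "") ++
        (PySem.Dict.mk (List.filter (fun p => !(p.1 == "title")) md)).getD "preamble" "") = _
  -- the two popped values  -- the two popped values are B's direct lookups
  have htitle : (PySem.Dict.mk md).getD "title" "" = pyDictGetItem md "title" := rfl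
  have hpre2 : (PySem.Dict.mk (md.filter (fun p => !(p.1 == "title")))).getD "preamble" ""
      = pyDictGetItem md "preamble" := by
    simp only [PySem.Dict.getD, PySem.Dict.get?, pyDictGetItem]
    rw [find?_filter_ne "title" "preamble" (by decide)]
  -- the remaining items after the two pops
  set l2 := (md.filter (fun p => !(p.1 == "title"))).filter (fun p => !(p.1 == "preamble")) with hl2
  have hnd2 : (l2.map Prod.fst).Nodup :=
    hnd.sublist (List.Sublist.map Prod.fst (List.filter_sublist.trans List.filter_sublist))
  have hg : ∀ kv ∈ l2, (PySem.Dict.mk l2).getD kv.1 "" = kv.2 := by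
    intro kv hm
    exact PySem.Dict.getD_of_mem_items (PySem.Dict.mk l2) hm (by simpa [PySem.Dict.keys_mk] using hnd2) ""
  rw [loop_eq rk (fun kv => (PySem.Dict.mk l2).getD kv.1 "") l2 _ hg, htitle, hpre2, hl2]
  simp only [List.filter_filter]
  simp only [String.append_assoc, String.empty_append]
  refine congrArg (fun z => pyDictGetItem md "title" ++ (pyDictGetItem md "preamble" ++ z)) (congrArg (PySem.Str.join "") (congrArg (List.map (fun kv : String × String => "\n" ++ kv.2)) (List.filter_congr fun kv _ => ?_)))
  cases kv.1 == "title" <;> cases kv.1 == "preamble" <;> cases rk.contains (some kv.1) <;> rfl
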